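-- pv_equiv track=rewrite | github.com/andreqwert/Image_processing | hisotgram_alignment.py | compute_cdf_min
-- ===== SOURCE A (Python) =====
-- def compute_cdf_min(cdf):
--     """Вычисляем минимальное значение функции распределения (для формулы)"""
--     values = sorted(list(set(cdf))) # удалили повторяющиеся значения
--     for value in values:
--         if values[0] == 0:
--             min_cdf = values[1]
--         else:
--             min_cdf = values[0]
--     return min_cdf
-- ===== SOURCE B (Python) =====
-- def compute_cdf_min(cdf):
--     """Вычисляем минимальное значение функции распределения (для формулы)"""
--     m = min(cdf)
--     if m != 0:
--         return m
--     return min(v for v in cdf if v != 0)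
-- ===== Notes on version B (the rewrite author's own statement) =====
-- stated objective: faster
-- what changed: Replaces dedup-then-sort (with a loop that redundantly reassigns the result) by direct min() calls: the overall min, and the min of nonzero values only when the min is 0.
import Mathlib
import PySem

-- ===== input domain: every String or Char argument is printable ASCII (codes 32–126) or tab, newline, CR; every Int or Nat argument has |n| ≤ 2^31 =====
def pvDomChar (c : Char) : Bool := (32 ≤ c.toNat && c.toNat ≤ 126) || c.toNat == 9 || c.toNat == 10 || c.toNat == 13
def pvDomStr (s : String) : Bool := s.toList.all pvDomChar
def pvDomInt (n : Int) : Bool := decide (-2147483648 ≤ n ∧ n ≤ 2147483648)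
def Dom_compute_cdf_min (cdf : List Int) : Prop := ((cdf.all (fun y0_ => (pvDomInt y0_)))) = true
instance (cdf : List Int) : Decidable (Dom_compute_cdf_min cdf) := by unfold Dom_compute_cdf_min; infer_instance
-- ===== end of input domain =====

-- B replaces A's dedup-then-sort (plus a loop that redundantly reassigns the result) by
-- direct min computations: the overall min, and the min of the nonzero values when the min is 0.


-- ===== PORT A =====
-- values = sorted(list(set(cdf))); for value in values: min_cdf = values[1] if values[0]==0 else values[0]
-- min_cdf starts as none (NameError if the loop never runs); pyGet? none = IndexError; both are
-- excluded by Pre_, the final .getD 0 is unreachable inside Pre_.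
def compute_cdf_min (cdf : List Int) : Int :=
  let values := PySem.List.sorted (PySem.Set.ofList cdf) (fun x => x) false
  let min_cdf : Option Int := values.foldl (fun _ _ =>
    if PySem.List.pyGet? values 0 = some 0 then PySem.List.pyGet? values 1
    else PySem.List.pyGet? values 0) none
  min_cdf.getD 0

-- ===== PORT B =====
-- m = min(cdf); return m if m != 0 else min(v for v in cdf if v != 0)
-- min of an empty sequence is ValueError; excluded by Pre_, .getD 0 unreachable inside Pre_.
def compute_cdf_min_alt (cdf : List Int) : Int :=
  let m := (PySem.List.min? cdf (fun x => x)).getD 0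
  if m ≠ 0 then m
  else (PySem.List.min? (cdf.filter (fun v => decide (v ≠ 0))) (fun x => x)).getD 0

-- ===== PRECONDITION & SPEC =====
-- Pre_ excludes exactly the inputs on which A raises: the empty list (NameError: min_cdf unassigned)
-- and all-zero lists (IndexError on values[1]); B raises ValueError there too.
def Pre_compute_cdf_min (cdf : List Int) : Prop := ∃ x ∈ cdf, x ≠ 0
instance (cdf : List Int) : Decidable (Pre_compute_cdf_min cdf) := by unfold Pre_compute_cdf_min; infer_instance
def pvWitness_compute_cdf_min : List Int := [0, 5, 2]

def Spec_compute_cdf_min (cdf : List Int) (out : Int) : Prop := out = compute_cdf_min_alt cdf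
instance (cdf : List Int) (out : Int) : Decidable (Spec_compute_cdf_min cdf out) := by unfold Spec_compute_cdf_min; infer_instance

-- ===== CLAIM (what is proved, stated in full; the proofs are below) =====
def Claim_equal_compute_cdf_min : Prop := ∀ (cdf : List Int), Dom_compute_cdf_min cdf → Pre_compute_cdf_min cdf → Spec_compute_cdf_min cdf (compute_cdf_min cdf)

-- ===== LEMMAS AND PROOFS =====

-- A's loop body ignores the loop variable and the accumulator: over a nonempty list the fold is its body.
theorem pv_foldl_const {α β : Type} (c : β) (a : β) (l : List α) (h : l ≠ []) :
    l.foldl (fun _ _ => c) a = c := by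
  induction l generalizing a with
  | nil => exact absurd rfl h
  | cons x t ih =>
    cases t with
    | nil => rfl
    | cons y t' => exact ih c (by simp)

-- min? on a nonempty list returns the unique minimum value (key = id).
theorem pv_min?_eq {xs : List Int} {m : Int} (hm : m ∈ xs) (hmin : ∀ y ∈ xs, m ≤ y) :
    PySem.List.min? xs (fun x => x) = some m := by
  cases hx : PySem.List.min? xs (fun x => x) with
  | none =>
    rw [PySem.List.min?_eq_none_iff] at hx
    subst hx; exact absurd hm (by simp)
  | some m' =>
    have h1 := PySem.List.min?_isMin hx m hm
    have h2 := hmin m' (PySem.List.min?_mem hx)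
    simp only [Option.some.injEq]
    omega

theorem compute_cdf_min_eq_alt (cdf : List Int) (hpre : Pre_compute_cdf_min cdf) :
    compute_cdf_min cdf = compute_cdf_min_alt cdf := by
  obtain ⟨a, ha, hane⟩ := hpre
  set s := PySem.List.sorted (PySem.Set.ofList cdf) (fun x => x) false with hs
  have hmem : ∀ x : Int, x ∈ s ↔ x ∈ cdf := by
    intro x
    rw [hs, PySem.List.mem_sorted, PySem.Set.mem_ofList]
  have hpw : s.Pairwise (· < ·) := by
    rw [hs]; exact PySem.List.sorted_ofList_pairwise_lt cdf
  have hsne : s ≠ [] := by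
    intro h; rw [← hmem a] at ha; simp [h] at ha
  obtain ⟨v0, t, hst⟩ := List.exists_cons_of_ne_nil hsne
  have hst' : PySem.List.sorted (PySem.Set.ofList cdf) (fun x => x) false = v0 :: t := by
    rw [← hs]; exact hst
  have hv0le : ∀ y ∈ cdf, v0 ≤ y := by
    intro y hy
    have := PySem.List.key_head_sorted_le (PySem.Set.ofList cdf) (fun x => x) hst' y (by rwa [PySem.Set.mem_ofList])
    simpa using this
  have hv0mem : v0 ∈ cdf := (hmem v0).1 (by simp [hst])
  have hminA : PySem.List.min? cdf (fun x => x) = some v0 := pv_min?_eq hv0mem hv0le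
  by_cases hv0 : v0 = 0
  · -- min is 0: A returns values[1]; B returns min of nonzero values
    subst hv0
    have htne : t ≠ [] := by
      intro h
      have hmem' : a ∈ s := (hmem a).2 ha
      rw [hst, h] at hmem'
      simp at hmem'
      exact hane hmem'
    obtain ⟨v1, t', htt⟩ := List.exists_cons_of_ne_nil htne
    rw [hst, htt] at hpw
    have hv01 : (0:Int) < v1 := (List.pairwise_cons.1 hpw).1 v1 (by simp)
    have hv1t' : ∀ z ∈ t', v1 < z := (List.pairwise_cons.1 (List.pairwise_cons.1 hpw).2).1
    -- A's value
    have hA : compute_cdf_min cdf = v1 := by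
      unfold compute_cdf_min
      rw [← hs, hst, htt]
      simp only [pv_foldl_const _ _ (0 :: v1 :: t') (by simp)]
      have h01 : (0:Int) ≤ (t'.length:Int) + 1 := by positivity
      simp [PySem.List.pyGet?, PySem.List.pyIdx?, h01]
    -- B's value
    have hB : compute_cdf_min_alt cdf = v1 := by
      unfold compute_cdf_min_alt
      rw [hminA]
      have hv1mem : v1 ∈ cdf.filter (fun v => decide (v ≠ 0)) := by
        rw [List.mem_filter]
        refine ⟨(hmem v1).1 (by simp [hst, htt]), by simp; omega⟩
      have hv1min : ∀ y ∈ cdf.filter (fun v => decide (v ≠ 0)), v1 ≤ y := by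
        intro y hy
        rw [List.mem_filter] at hy
        have hys : y ∈ s := (hmem y).2 hy.1
        rw [hst, htt] at hys
        have hcases : y = 0 ∨ y = v1 ∨ y ∈ t' := by simpa using hys
        rcases hcases with h | h | h
        · exfalso; simp at hy; exact hy.2 h
        · omega
        · exact le_of_lt (hv1t' y h)
      rw [pv_min?_eq hv1mem hv1min]
      simp
    rw [hA, hB]
  · -- min nonzero: both return v0
    have hA : compute_cdf_min cdf = v0 := by
      unfold compute_cdf_min
      rw [← hs, hst]
      simp only [pv_foldl_const _ _ (v0 :: t) (by simp)]
      simp [PySem.List.pyGet?, PySem.List.pyIdx?, hv0]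
    have hB : compute_cdf_min_alt cdf = v0 := by
      unfold compute_cdf_min_alt
      rw [hminA]
      simp [hv0]
    rw [hA, hB]

-- ===== VERDICT (by name: the statement is the Claim_ definition above) =====
theorem compute_cdf_min_spec : Claim_equal_compute_cdf_min := by
  intro cdf _ hpre
  unfold Spec_compute_cdf_min
  exact compute_cdf_min_eq_alt cdf hpre
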